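-- pv_equiv track=rewrite | github.com/mattfeng/rosalind | grph/grph.py | build_overlap_graph
-- ===== SOURCE A (Python) =====
-- from collections import defaultdict
--
-- def build_overlap_graph(dnaseqs, k):
--     prefix_seqs = defaultdict(list)
--     suffix_seqs = defaultdict(list)
--
--     adj_list = defaultdict(list)
--
--     for name, seq in dnaseqs.items():
--         prefix = seq[:k]
--         suffix = seq[-k:]
--         prefix_seqs[prefix].append(name)
--         suffix_seqs[suffix].append(name)
--
--     for name, seq in dnaseqs.items():
--         prefix = seq[:k]
--         suffix = seq[-k:]
--
--         for oname in prefix_seqs[suffix]: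
--             if oname != name:
--                 adj_list[name].append(oname)
--
--     return adj_list
-- ===== SOURCE B (Python) =====
-- from collections import defaultdict
--
-- def build_overlap_graph(dnaseqs, k):
--     adj_list = defaultdict(list)
--     for name, seq in dnaseqs.items():
--         for oname, oseq in dnaseqs.items():
--             if oname != name and seq[-k:] == oseq[:k]:
--                 adj_list[name].append(oname)
--     return adj_list
-- ===== Notes on version B (the rewrite author's own statement) =====
-- stated objective: simpler
-- what changed: Drops both prefix/suffix index dicts and the two-phase build: B computes the graph in one direct all-pairs double loop over dnaseqs.items(), appending oname whenever seq[-k:] == oseq[:k] and oname != name.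
import Mathlib
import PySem

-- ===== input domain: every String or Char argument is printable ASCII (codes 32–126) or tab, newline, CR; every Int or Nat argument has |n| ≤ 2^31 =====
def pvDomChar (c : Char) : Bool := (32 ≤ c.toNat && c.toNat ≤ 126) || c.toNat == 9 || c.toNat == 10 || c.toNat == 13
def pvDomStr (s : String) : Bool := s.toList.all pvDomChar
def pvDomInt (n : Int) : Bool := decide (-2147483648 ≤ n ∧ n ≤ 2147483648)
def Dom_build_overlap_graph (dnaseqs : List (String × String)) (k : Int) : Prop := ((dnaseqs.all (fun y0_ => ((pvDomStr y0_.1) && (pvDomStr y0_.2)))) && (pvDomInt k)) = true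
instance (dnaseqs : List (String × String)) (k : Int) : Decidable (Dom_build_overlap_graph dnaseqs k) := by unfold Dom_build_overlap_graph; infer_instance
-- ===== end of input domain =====

-- B replaces A's prefix/suffix index dicts with one direct all-pairs double loop (simpler, not faster).

-- ===== PORT A =====
-- seq[:k] and seq[-k:] (any Int k, Python clamping)
def pvPrefix (seq : String) (k : Int) : String := PySem.Str.slice seq none (some k)
def pvSuffix (seq : String) (k : Int) : String := PySem.Str.slice seq (some (-k)) none

def build_overlap_graph (dnaseqs : List (String × String)) (k : Int) : List (String × List String) :=
  -- first loop: build the prefix and suffix indexes (suffix_seqs is built but never read in A)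
  let prefix_seqs : PySem.Dict String (List String) :=
    dnaseqs.foldl (fun d p => d.modify (pvPrefix p.2 k) [] (· ++ [p.1])) PySem.Dict.empty
  let _suffix_seqs : PySem.Dict String (List String) :=
    dnaseqs.foldl (fun d p => d.modify (pvSuffix p.2 k) [] (· ++ [p.1])) PySem.Dict.empty
  -- second loop: prefix_seqs[suffix] on the defaultdict may insert an empty bucket into
  -- prefix_seqs, which is unobservable in the returned value, so getD _ [] is exact here
  let adj_list : PySem.Dict String (List String) :=
    dnaseqs.foldl (fun adj p =>
      let suffix := pvSuffix p.2 k
      (prefix_seqs.getD suffix []).foldl (fun adj oname =>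
        if oname ≠ p.1 then adj.modify p.1 [] (· ++ [oname]) else adj) adj)
      PySem.Dict.empty
  adj_list.items

-- ===== PORT B =====
def build_overlap_graph_alt (dnaseqs : List (String × String)) (k : Int) : List (String × List String) :=
  (dnaseqs.foldl (fun adj p =>
      dnaseqs.foldl (fun adj q =>
        if q.1 ≠ p.1 ∧ PySem.Str.slice p.2 (some (-k)) none = PySem.Str.slice q.2 none (some k)
        then adj.modify p.1 [] (· ++ [q.1]) else adj) adj)
    PySem.Dict.empty).items

-- ===== PRECONDITION & SPEC =====
def Spec_build_overlap_graph (dnaseqs : List (String × String)) (k : Int) (out : List (String × List String)) : Prop := out = build_overlap_graph_alt dnaseqs k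
instance (dnaseqs : List (String × String)) (k : Int) (out : List (String × List String)) : Decidable (Spec_build_overlap_graph dnaseqs k out) := by unfold Spec_build_overlap_graph; infer_instance

-- ===== CLAIM (what is proved, stated in full; the proofs are below) =====
def Claim_equal_build_overlap_graph : Prop := ∀ (dnaseqs : List (String × String)) (k : Int), Dom_build_overlap_graph dnaseqs k → Spec_build_overlap_graph dnaseqs k (build_overlap_graph dnaseqs k)

-- ===== LEMMAS AND PROOFS =====

-- A's bucket prefix_seqs[suffix] is exactly the names of the pairs whose k-prefix equals suffix, in order.
theorem pv_bucket (dnaseqs : List (String × String)) (k : Int) (c : String) :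
    (dnaseqs.foldl (fun d p => d.modify (pvPrefix p.2 k) [] (· ++ [p.1])) PySem.Dict.empty).getD c []
      = ((dnaseqs.filter (fun q => pvPrefix q.2 k == c)).map (·.1)) := by
  have h := PySem.Dict.getD_foldl_modify_append
      (l := dnaseqs.map (fun p => (pvPrefix p.2 k, p.1))) (d := PySem.Dict.empty) (c := c)
  rw [List.foldl_map] at h
  simp only [h, PySem.Dict.getD_empty, List.nil_append, List.filter_map, List.map_map]
  rfl

-- A's inner loop over the bucket equals B's inner loop over dnaseqs.
theorem pv_inner (dnaseqs : List (String × String)) (k : Int) (name suffix : String)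
    (adj : PySem.Dict String (List String)) :
    ((dnaseqs.filter (fun q => pvPrefix q.2 k == suffix)).map (·.1)).foldl
        (fun adj oname => if oname ≠ name then adj.modify name [] (· ++ [oname]) else adj) adj
      = dnaseqs.foldl (fun adj q =>
          if q.1 ≠ name ∧ suffix = PySem.Str.slice q.2 none (some k)
          then adj.modify name [] (· ++ [q.1]) else adj) adj := by
  induction dnaseqs generalizing adj with
  | nil => rfl
  | cons q l ih =>
    have hiff : (q.1 ≠ name ∧ suffix = PySem.Str.slice q.2 none (some k))
        ↔ (q.1 ≠ name ∧ pvPrefix q.2 k = suffix) := by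
      unfold pvPrefix
      exact ⟨fun ⟨h1, h2⟩ => ⟨h1, h2.symm⟩, fun ⟨h1, h2⟩ => ⟨h1, h2.symm⟩⟩
    simp only [List.filter_cons, List.foldl_cons]
    by_cases hp : pvPrefix q.2 k = suffix
    · rw [if_pos (by simp [hp])]
      simp only [List.map_cons, List.foldl_cons]
      by_cases hn : q.1 ≠ name
      · rw [if_pos hn, if_pos (hiff.mpr ⟨hn, hp⟩), ih]
      · rw [if_neg hn, if_neg (fun h => hn (hiff.mp h).1), ih]
    · rw [if_neg (by simp [hp]), if_neg (fun h => hp (hiff.mp h).2), ih]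

-- ===== VERDICT (by name: the statement is the Claim_ definition above) =====
theorem build_overlap_graph_spec : Claim_equal_build_overlap_graph := by
  intro dnaseqs k _
  unfold Spec_build_overlap_graph
  simp only [build_overlap_graph, build_overlap_graph_alt]
  have hstep :
      (fun (adj : PySem.Dict String (List String)) (p : String × String) =>
        ((dnaseqs.foldl (fun d p => d.modify (pvPrefix p.2 k) [] (· ++ [p.1]))
              PySem.Dict.empty).getD (pvSuffix p.2 k) []).foldl
          (fun adj oname => if oname ≠ p.1 then adj.modify p.1 [] (· ++ [oname]) else adj) adj)
      = (fun (adj : PySem.Dict String (List String)) (p : String × String) =>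
          dnaseqs.foldl (fun adj q =>
            if q.1 ≠ p.1 ∧ PySem.Str.slice p.2 (some (-k)) none = PySem.Str.slice q.2 none (some k)
            then adj.modify p.1 [] (· ++ [q.1]) else adj) adj) := by
    funext adj p
    rw [pv_bucket, pv_inner]
    simp only [pvSuffix]
    rfl
  exact congrArg PySem.Dict.items
    (congrFun (congrFun (congrArg List.foldl hstep) PySem.Dict.empty) dnaseqs)
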